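-- pv_equiv track=rewrite | github.com/MIC-DKFZ/MeisenMeister | meisenmeister/training/predict.py | _validate_folds
-- ===== SOURCE A (Python) =====
-- def _validate_folds(folds: list[int]) -> list[int]:
--     if not folds:
--         raise ValueError("At least one fold must be provided")
--     if any(fold < 0 for fold in folds):
--         raise ValueError(f"All folds must be non-negative, got {folds}")
--     unique_folds = sorted(set(int(fold) for fold in folds))
--     if len(unique_folds) != len(folds):
--         raise ValueError(f"Folds must be unique, got {folds}")
--     return unique_folds
-- ===== SOURCE B (Python) =====
-- def _insert_sorted(v, vals):
--     """Insert v into the strictly increasing list vals; None signals v is already present."""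
--     i = 0
--     while i < len(vals) and vals[i] < v:
--         i += 1
--     if i < len(vals) and vals[i] == v:
--         return None
--     return vals[:i] + [v] + vals[i:]
--
--
-- def _validate_folds(folds: list[int]) -> list[int]:
--     if not folds:
--         raise ValueError("At least one fold must be provided")
--     if any(fold < 0 for fold in folds):
--         raise ValueError(f"All folds must be non-negative, got {folds}")
--     vals = []
--     for fold in folds:
--         vals = _insert_sorted(int(fold), vals)
--         if vals is None:
--             raise ValueError(f"Folds must be unique, got {folds}")
--     return vals
-- ===== Notes on version B (the rewrite author's own statement) =====
-- stated objective: alternative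
-- what changed: Replaces A's sorted(set(...)) plus cardinality comparison with an incremental insertion sort: each fold is inserted into a strictly increasing accumulator and a duplicate is raised the moment the insertion point already holds that value; no set and no library sort are used.
import Mathlib
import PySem

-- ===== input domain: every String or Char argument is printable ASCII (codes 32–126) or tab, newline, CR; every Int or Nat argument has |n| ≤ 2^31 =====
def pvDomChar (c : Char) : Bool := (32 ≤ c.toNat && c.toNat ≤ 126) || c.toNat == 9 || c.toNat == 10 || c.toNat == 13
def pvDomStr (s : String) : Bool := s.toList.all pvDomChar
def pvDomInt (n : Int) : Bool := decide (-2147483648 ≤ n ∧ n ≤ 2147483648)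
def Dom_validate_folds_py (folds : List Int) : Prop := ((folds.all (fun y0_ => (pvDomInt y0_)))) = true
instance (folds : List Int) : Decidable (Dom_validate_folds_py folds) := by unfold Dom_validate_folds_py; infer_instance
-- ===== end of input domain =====

-- B replaces A's sorted(set(...)) + cardinality test by an incremental insertion sort that
-- detects a duplicate at the insertion point (objective: alternative; no set, no library sort).
-- Both raise on the same inputs; Pre_ excludes exactly the raising inputs.

-- ===== PORT A =====
-- raise branches (ValueError) return []; Pre_ excludes them
def validate_folds_py (folds : List Int) : List Int :=
  if folds = [] then []
  else if folds.any (fun fold => decide (fold < 0)) then []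
  else
    let unique_folds := PySem.List.sorted (PySem.Set.ofList folds) (fun x => x) false
    if unique_folds.length ≠ folds.length then [] else unique_folds

-- ===== PORT B =====
-- _insert_sorted: the index scan over the sorted accumulator, as structural recursion;
-- 'none' is Python's None (duplicate found)
def pvInsertSorted (v : Int) : List Int → Option (List Int)
  | [] => some [v]
  | h :: t =>
    if v < h then some (v :: h :: t)
    else if v == h then none
    else (pvInsertSorted v t).map (h :: ·)

def validate_folds_py_alt (folds : List Int) : List Int :=
  if folds = [] then []
  else if folds.any (fun fold => decide (fold < 0)) then []
  else
    match folds.foldl (fun acc fold => acc.bind (pvInsertSorted fold)) (some []) with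
    | none => []        -- the in-loop duplicate raise; Pre_ excludes it
    | some vals => vals

-- ===== PRECONDITION & SPEC =====
-- exactly the inputs on which A returns normally: nonempty, no negatives, no duplicates
def Pre_validate_folds_py (folds : List Int) : Prop :=
  folds ≠ [] ∧ (∀ x ∈ folds, 0 ≤ x) ∧ folds.Nodup
instance (folds : List Int) : Decidable (Pre_validate_folds_py folds) := by
  unfold Pre_validate_folds_py; infer_instance
def pvWitness_validate_folds_py : List Int := [2, 0, 1]

def Spec_validate_folds_py (folds : List Int) (out : List Int) : Prop := out = validate_folds_py_alt folds
instance (folds : List Int) (out : List Int) : Decidable (Spec_validate_folds_py folds out) := by unfold Spec_validate_folds_py; infer_instance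

-- ===== CLAIM =====
def Claim_equal_validate_folds_py : Prop := ∀ (folds : List Int), Dom_validate_folds_py folds → Pre_validate_folds_py folds → Spec_validate_folds_py folds (validate_folds_py folds)

-- ===== LEMMAS AND PROOFS =====

-- inserting a fresh value into a strictly increasing list succeeds and keeps it so
theorem pvInsertSorted_fresh (v : Int) (l : List Int) (hs : l.Pairwise (· < ·)) (hv : v ∉ l) :
    ∃ m, pvInsertSorted v l = some m ∧ m.Perm (v :: l) ∧ m.Pairwise (· < ·) := by
  induction l with
  | nil => exact ⟨[v], rfl, List.Perm.refl _, by simp⟩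
  | cons h t ih =>
    rcases List.pairwise_cons.mp hs with ⟨hht, hts⟩
    by_cases hlt : v < h
    · refine ⟨v :: h :: t, by simp [pvInsertSorted, hlt], List.Perm.refl _, ?_⟩
      refine List.pairwise_cons.mpr ⟨?_, hs⟩
      intro b hb
      rcases List.mem_cons.mp hb with e | hb
      · exact e ▸ hlt
      · exact lt_trans hlt (hht b hb)
    · have hne : ¬ (v == h) = true := by
        simp only [beq_iff_eq]; intro e; exact hv (e ▸ List.mem_cons_self ..)
      rcases ih hts (fun hm => hv (List.mem_cons_of_mem _ hm)) with ⟨m, hm, hperm, hps⟩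
      have hhv : h < v := by
        rcases lt_trichotomy v h with h1 | h1 | h1
        · exact absurd h1 hlt
        · exact absurd h1 (by simpa [beq_iff_eq] using hne)
        · exact h1
      refine ⟨h :: m, by simp [pvInsertSorted, hlt, hne, hm], ?_, ?_⟩
      · exact (hperm.cons h).trans (List.Perm.swap v h t)
      · refine List.pairwise_cons.mpr ⟨?_, hps⟩
        intro b hb
        rcases List.mem_cons.mp ((hperm.mem_iff).mp hb) with e | hb
        · exact e ▸ hhv
        · exact hht b hb

-- the foldl over Option keeps a strictly increasing permutation of acc ++ processed
theorem pvFold_insert (xs : List Int) (L : List Int) (hL : L.Pairwise (· < ·))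
    (hnd : xs.Nodup) (hdis : ∀ x ∈ xs, x ∉ L) :
    ∃ M, xs.foldl (fun acc fold => acc.bind (pvInsertSorted fold)) (some L) = some M ∧
      M.Perm (L ++ xs) ∧ M.Pairwise (· < ·) := by
  induction xs generalizing L with
  | nil => exact ⟨L, rfl, by simp, hL⟩
  | cons x t ih =>
    rcases List.nodup_cons.mp hnd with ⟨hxt, hndt⟩
    rcases pvInsertSorted_fresh x L hL (hdis x (List.mem_cons_self ..)) with ⟨m, hm, hperm, hps⟩
    have hdis' : ∀ y ∈ t, y ∉ m := by
      intro y hy hym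
      rcases List.mem_cons.mp ((hperm.mem_iff).mp hym) with e | hyL
      · exact hxt (e ▸ hy)
      · exact hdis y (List.mem_cons_of_mem _ hy) hyL
    rcases ih m hps hndt hdis' with ⟨M, hM, hMperm, hMps⟩
    refine ⟨M, by simpa [hm] using hM, ?_, hMps⟩
    exact (hMperm.trans (hperm.append_right t)).trans
      (by simpa using (List.perm_middle (a := x) (l₁ := L) (l₂ := t)).symm)

-- ===== VERDICT =====
theorem validate_folds_py_spec : Claim_equal_validate_folds_py := by
  intro folds _ ⟨hne, _, hnd⟩
  unfold Spec_validate_folds_py validate_folds_py validate_folds_py_alt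
  rw [if_neg hne, if_neg hne]
  by_cases hneg : folds.any (fun fold => decide (fold < 0)) = true
  · rw [if_pos hneg, if_pos hneg]
  · rw [if_neg hneg, if_neg hneg]
    rcases pvFold_insert folds [] (by simp) hnd (by simp) with ⟨M, hM, hMperm, hMps⟩
    have hperm : M.Perm folds := by simpa using hMperm
    have hset : PySem.Set.ofList folds = folds := PySem.Set.ofList_eq_self_of_nodup folds hnd
    have hsorted : PySem.List.sorted folds (fun x => x) false = M :=
      PySem.List.sorted_id_eq_of_perm_of_pairwise _ _ hperm (hMps.imp le_of_lt)
    have hlen : M.length = folds.length := hperm.length_eq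
    simp [hset, hM, hsorted, hlen]
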